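-- pv_equiv track=rewrite | github.com/oakink/OakInk2-PreviewTool | src/oakink2_toolkit/program.py | suffix_affordance_primitive_segment
-- ===== SOURCE A (Python) =====
-- def suffix_affordance_primitive_segment(attr_store):
--     seg_name_map = {}
--
--     counter = {}
--     for k, v in attr_store.items():
--         _prim = v["primitive"]
--         if _prim in ["hold", "rearrange", "swap", "?(unk)"]:
--             continue
--         if _prim not in counter:
--             name = f"{_prim}:{0:0>2}"
--             counter[_prim] = 1
--         else:
--             name = f"{_prim}:{counter[_prim]:0>2}"
--             counter[_prim] += 1
--         seg_name_map[str(k)] = name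
--     return seg_name_map
-- ===== SOURCE B (Python) =====
-- def suffix_affordance_primitive_segment(attr_store):
--     skip = ("hold", "rearrange", "swap", "?(unk)")
--     kept = [(str(k), v["primitive"]) for k, v in attr_store.items()
--             if v["primitive"] not in skip]
--     return {k: f"{p}:{sum(q == p for _, q in kept[:i]):0>2}"
--             for i, (k, p) in enumerate(kept)}
-- ===== Notes on version B (the rewrite author's own statement) =====
-- stated objective: alternative
-- what changed: Replaces A's single pass with a running per-primitive counter dict by a filter-then-enumerate decomposition: first build the kept (key, primitive) list, then name each entry by counting equal primitives in its prefix; Pre_ excludes inner dicts lacking a 'primitive' key (A raises KeyError) and association lists with duplicate keys, which do not represent a Python dict.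
import Mathlib
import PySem

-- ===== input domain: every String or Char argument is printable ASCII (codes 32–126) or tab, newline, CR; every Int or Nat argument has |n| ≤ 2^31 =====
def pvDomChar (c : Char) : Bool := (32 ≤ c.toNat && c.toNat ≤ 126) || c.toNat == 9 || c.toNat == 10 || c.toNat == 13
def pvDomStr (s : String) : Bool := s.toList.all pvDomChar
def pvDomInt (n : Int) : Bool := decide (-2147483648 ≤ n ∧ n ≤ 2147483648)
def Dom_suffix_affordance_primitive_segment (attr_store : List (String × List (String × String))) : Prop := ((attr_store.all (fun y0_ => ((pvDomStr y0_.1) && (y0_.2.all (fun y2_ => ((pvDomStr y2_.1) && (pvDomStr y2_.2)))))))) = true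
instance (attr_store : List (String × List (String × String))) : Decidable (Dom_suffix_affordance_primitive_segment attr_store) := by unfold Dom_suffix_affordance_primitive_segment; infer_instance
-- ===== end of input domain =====

-- B replaces A's single pass with a running counter dict by a filter-then-enumerate
-- decomposition (build the kept (key, primitive) list once, then name each entry by
-- counting equal primitives in its prefix); objective: alternative, same results.

-- f"{p}:{n:0>2}" — '0'-fill, right-aligned, minimum width 2 (shared formatting helper,
-- both Pythons use the identical format spec)
def pvFmt2 (p : String) (n : Int) : String :=
  let ds := PySem.Int.toChars n
  String.ofList (p.toList ++ ':' :: (List.replicate (2 - ds.length) '0' ++ ds))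

-- ===== PORT A =====
def pvStepA (st : PySem.Dict String String × PySem.Dict String Int)
    (kv : String × List (String × String)) :
    PySem.Dict String String × PySem.Dict String Int :=
  match (PySem.Dict.mk kv.2).get? "primitive" with
  | none => st  -- KeyError in Python; excluded by Pre_
  | some prim =>
    if prim ∈ ["hold", "rearrange", "swap", "?(unk)"] then st
    else
      match st.2.get? prim with
      | none => (st.1.insert kv.1 (pvFmt2 prim 0), st.2.insert prim 1)
      | some c => (st.1.insert kv.1 (pvFmt2 prim c), st.2.insert prim (c + 1))

def suffix_affordance_primitive_segment (attr_store : List (String × List (String × String))) : List (String × String) :=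
  (attr_store.foldl pvStepA (PySem.Dict.empty, PySem.Dict.empty)).1.items

-- ===== PORT B =====
-- the list comprehension: kept (str(k), primitive) pairs, in order
def pvKept (attr_store : List (String × List (String × String))) : List (String × String) :=
  attr_store.filterMap (fun kv =>
    match (PySem.Dict.mk kv.2).get? "primitive" with
    | none => none  -- KeyError in Python; excluded by Pre_
    | some p => if p ∈ ["hold", "rearrange", "swap", "?(unk)"] then none else some (kv.1, p))

def suffix_affordance_primitive_segment_alt (attr_store : List (String × List (String × String))) : List (String × String) :=
  let kept := pvKept attr_store
  ((PySem.List.enumerate kept).foldl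
    (fun seg ip =>
      seg.insert ip.2.1
        (pvFmt2 ip.2.2
          (((PySem.List.slice kept none (some ip.1)).countP (fun x => x.2 == ip.2.2) : Int))))
    PySem.Dict.empty).items

-- ===== PRECONDITION & SPEC =====
-- Pre_ excludes (a) inner dicts without a "primitive" key, where Python A raises KeyError,
-- and (b) association lists with duplicate keys (outer or inner), which do not represent a
-- Python dict input at all (a dict has unique keys; duplicates are a representation artifact).
def Pre_suffix_affordance_primitive_segment (attr_store : List (String × List (String × String))) : Prop :=
  (attr_store.map (·.1)).Nodup ∧
  ∀ kv ∈ attr_store, (kv.2.map (·.1)).Nodup ∧ "primitive" ∈ kv.2.map (·.1)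
instance (attr_store : List (String × List (String × String))) : Decidable (Pre_suffix_affordance_primitive_segment attr_store) := by unfold Pre_suffix_affordance_primitive_segment; infer_instance

def pvWitness_suffix_affordance_primitive_segment : (List (String × List (String × String))) :=
  [("seg0", [("primitive", "pour")]), ("seg1", [("primitive", "hold")]), ("seg2", [("primitive", "pour")])]

def Spec_suffix_affordance_primitive_segment (attr_store : List (String × List (String × String))) (out : List (String × String)) : Prop := out = suffix_affordance_primitive_segment_alt attr_store
instance (attr_store : List (String × List (String × String))) (out : List (String × String)) : Decidable (Spec_suffix_affordance_primitive_segment attr_store out) := by unfold Spec_suffix_affordance_primitive_segment; infer_instance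

-- ===== CLAIM (what is proved, stated in full; the proofs are below) =====
def Claim_equal_suffix_affordance_primitive_segment : Prop := ∀ (attr_store : List (String × List (String × String))), Dom_suffix_affordance_primitive_segment attr_store → Pre_suffix_affordance_primitive_segment attr_store → Spec_suffix_affordance_primitive_segment attr_store (suffix_affordance_primitive_segment attr_store)

-- ===== LEMMAS AND PROOFS =====

-- common normal form: name each kept pair by the number of equal primitives before it
def pvBuild (pre : List String) : List (String × String) → List (String × String)
  | [] => []
  | (k, p) :: t => (k, pvFmt2 p ((pre.count p : Int))) :: pvBuild (pre ++ [p]) t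

lemma pvKept_keys_sublist (l : List (String × List (String × String))) :
    ((pvKept l).map (·.1)).Sublist (l.map (·.1)) := by
  induction l with
  | nil => simp [pvKept]
  | cons kv t ih =>
    simp only [pvKept, List.filterMap_cons] at *
    cases h : (PySem.Dict.mk kv.2).get? "primitive" with
    | none => simpa [h] using ih.cons kv.1
    | some p =>
      by_cases hs : p ∈ ["hold", "rearrange", "swap", "?(unk)"]
      · simpa [h, hs] using ih.cons kv.1
      · simpa [h, hs] using ih.cons₂ kv.1

lemma pvA_loop (l : List (String × List (String × String))) :
    ∀ (pre : List String) (seg : PySem.Dict String String) (counter : PySem.Dict String Int),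
    (∀ p, counter.get? p = if pre.count p = 0 then none else some ((pre.count p : Int))) →
    (∀ k ∈ (pvKept l).map (·.1), seg.contains k = false) →
    ((pvKept l).map (·.1)).Nodup →
    (l.foldl pvStepA (seg, counter)).1.items = seg.items ++ pvBuild pre (pvKept l) := by
  induction l with
  | nil => intro pre seg counter _ _ _; simp [pvKept, pvBuild]
  | cons kv t ih =>
    intro pre seg counter hcnt hfresh hnd
    simp only [List.foldl_cons]
    cases h : (PySem.Dict.mk kv.2).get? "primitive" with
    | none =>
      have hk : pvKept (kv :: t) = pvKept t := by
        simp only [pvKept, List.filterMap_cons, h]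
      rw [hk] at hfresh hnd
      rw [hk]
      simp only [pvStepA, h]
      exact ih pre seg counter hcnt hfresh hnd
    | some prim =>
      by_cases hs : prim ∈ ["hold", "rearrange", "swap", "?(unk)"]
      · have hk : pvKept (kv :: t) = pvKept t := by
          simp only [pvKept, List.filterMap_cons, h]
          simp [show (prim = "hold" ∨ prim = "rearrange" ∨ prim = "swap" ∨ prim = "?(unk)") by
            simpa using hs]
        rw [hk] at hfresh hnd
        rw [hk]
        simp only [pvStepA, h, if_pos hs]
        exact ih pre seg counter hcnt hfresh hnd
      · have hk : pvKept (kv :: t) = (kv.1, prim) :: pvKept t := by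
          simp only [pvKept, List.filterMap_cons, h]
          simp [show ¬ (prim = "hold" ∨ prim = "rearrange" ∨ prim = "swap" ∨ prim = "?(unk)") by
            simpa using hs]
        rw [hk] at hfresh hnd
        have hfresh0 : seg.contains kv.1 = false := hfresh kv.1 (by simp)
        have hnotin : kv.1 ∉ (pvKept t).map (·.1) := by
          simp only [List.map_cons, List.nodup_cons] at hnd; exact hnd.1
        have hfresh' : ∀ k ∈ (pvKept t).map (·.1),
            (seg.insert kv.1 (pvFmt2 prim ((pre.count prim : Int)))).contains k = false := by
          intro k hkmem
          rw [PySem.Dict.contains_insert]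
          have hne : k ≠ kv.1 := fun he => hnotin (he ▸ hkmem)
          simp [hne, hfresh k (by simp [hkmem])]
        have hnd' : ((pvKept t).map (·.1)).Nodup := by
          simp only [List.map_cons, List.nodup_cons] at hnd; exact hnd.2
        have hcnt' : ∀ p, (counter.insert prim ((pre.count prim : Int) + 1)).get? p =
            if (pre ++ [prim]).count p = 0 then none else some (((pre ++ [prim]).count p : Int)) := by
          intro p
          rw [PySem.Dict.get?_insert]
          by_cases hp : p = prim
          · subst hp; simp [List.count_append]
          · have hpp : (pre ++ [prim]).count p = pre.count p := by
              simp [List.count_append, Ne.symm hp]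
            simp [hp, hpp, hcnt p]
        have hstep : pvStepA (seg, counter) kv =
            (seg.insert kv.1 (pvFmt2 prim ((pre.count prim : Int))),
             counter.insert prim ((pre.count prim : Int) + 1)) := by
          simp only [pvStepA, h, if_neg hs, hcnt prim]
          by_cases h0 : pre.count prim = 0
          · simp [h0]
          · simp [h0]
        rw [hstep, ih (pre ++ [prim]) _ _ hcnt' hfresh' hnd',
          PySem.Dict.items_insert_of_not_contains _ _ hfresh0, hk]
        simp [pvBuild]

lemma pvB_loop (t : List (String × String)) :
    ∀ (pre : List (String × String)) (seg : PySem.Dict String String),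
    (∀ k ∈ t.map (·.1), seg.contains k = false) →
    (t.map (·.1)).Nodup →
    ((PySem.List.enumerate t ((pre.length : Int))).foldl
      (fun seg ip =>
        seg.insert ip.2.1
          (pvFmt2 ip.2.2
            (((PySem.List.slice (pre ++ t) none (some ip.1)).countP (fun x => x.2 == ip.2.2) : Int))))
      seg).items = seg.items ++ pvBuild (pre.map (·.2)) t := by
  induction t with
  | nil => intro pre seg _ _; simp [pvBuild]
  | cons x t ih =>
    intro pre seg hfresh hnd
    rw [PySem.List.enumerate_cons, List.foldl_cons]
    have hsl : PySem.List.slice (pre ++ x :: t) none (some ((pre.length : Int))) = pre := by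
      rw [PySem.List.slice_to_natCast]
      simp
    have hcount : ((PySem.List.slice (pre ++ x :: t) none (some ((pre.length : Int)))).countP (fun y => y.2 == x.2) : Int)
        = (((pre.map (·.2)).count x.2 : Int)) := by
      rw [hsl, List.count_eq_countP, List.countP_map]
      rfl
    have hfresh0 : seg.contains x.1 = false := hfresh x.1 (by simp)
    have hnotin : x.1 ∉ t.map (·.1) := by
      simp only [List.map_cons, List.nodup_cons] at hnd; exact hnd.1
    have hnd' : (t.map (·.1)).Nodup := by
      simp only [List.map_cons, List.nodup_cons] at hnd; exact hnd.2
    have hfresh' : ∀ k ∈ t.map (·.1),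
        (seg.insert x.1 (pvFmt2 x.2 (((pre.map (·.2)).count x.2 : Int)))).contains k = false := by
      intro k hkmem
      rw [PySem.Dict.contains_insert]
      have hne : k ≠ x.1 := fun he => hnotin (he ▸ hkmem)
      simp [hne, hfresh k (by simp [hkmem])]
    have harr : (pre.length : Int) + 1 = (((pre ++ [x]).length : Int)) := by
      simp
    have hrest : pre ++ x :: t = (pre ++ [x]) ++ t := by simp
    rw [hcount, harr, hrest]
    rw [ih (pre ++ [x]) _ hfresh' hnd',
      PySem.Dict.items_insert_of_not_contains _ _ hfresh0]
    obtain ⟨k, p⟩ := x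
    simp [pvBuild]

-- ===== VERDICT (by name: the statement is the Claim_ definition above) =====
theorem suffix_affordance_primitive_segment_spec : Claim_equal_suffix_affordance_primitive_segment := by
  intro attr_store _ hPre
  unfold Spec_suffix_affordance_primitive_segment
  have hnd : ((pvKept attr_store).map (·.1)).Nodup :=
    hPre.1.sublist (pvKept_keys_sublist attr_store)
  have hA : suffix_affordance_primitive_segment attr_store = pvBuild [] (pvKept attr_store) := by
    unfold suffix_affordance_primitive_segment
    rw [pvA_loop attr_store [] PySem.Dict.empty PySem.Dict.empty
      (fun p => by simp [PySem.Dict.get?_empty])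
      (fun k _ => by simp [PySem.Dict.contains_empty]) hnd]
    rfl
  have hB : suffix_affordance_primitive_segment_alt attr_store = pvBuild [] (pvKept attr_store) := by
    unfold suffix_affordance_primitive_segment_alt
    have hb := pvB_loop (pvKept attr_store) [] PySem.Dict.empty
      (fun k _ => by simp [PySem.Dict.contains_empty]) hnd
    simpa using hb
  rw [hA, hB]
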